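-- pv_equiv track=rewrite | github.com/slashben/hadassah-picoctf-2025-writeups | writeups/cryptography/transposition-trial/python/solution.py | descramble_message
-- ===== SOURCE A (Python) =====
-- def descramble_message(scrambled_text):
--     # Scrambling pattern: 'The' → 'heT' ⇒ indices [1, 2, 0]
--     # We need to reverse it: from 'heT' get back 'The' ⇒ original[0] = scrambled[2], etc.
--     unscramble_order = [2, 0, 1]
--
--     # Break text into 3-character blocks
--     blocks = [scrambled_text[i:i+3] for i in range(0, len(scrambled_text), 3)]
--
--     # Unscramble each block
--     descrambled = []
--     for block in blocks:
--         if len(block) == 3: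
--             # Reorder characters according to unscramble_order
--             descrambled_block = ''.join(block[i] for i in unscramble_order)
--         else:
--             # If block isn't 3 characters (e.g., last few chars), keep as is
--             descrambled_block = block
--         descrambled.append(descrambled_block)
--
--     # Join the blocks back into a single string
--     return ''.join(descrambled)
-- ===== SOURCE B (Python) =====
-- def descramble_message(scrambled_text):
--     # Single index-walking pass: emit each block as [i+2, i, i+1] directly,
--     # then append the short remainder unchanged.
--     n = len(scrambled_text)
--     out = []
--     i = 0
--     while i + 3 <= n:
--         out.append(scrambled_text[i + 2])
--         out.append(scrambled_text[i])
--         out.append(scrambled_text[i + 1])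
--         i += 3
--     out.append(scrambled_text[i:])
--     return ''.join(out)
-- ===== Notes on version B (the rewrite author's own statement) =====
-- stated objective: simpler
-- what changed: Replaced the build-blocks-then-reorder-then-join pipeline (a slice comprehension, a per-block branch, a per-block join and a final join) by one index-walking loop that emits each block's characters directly in order [i+2,i,i+1] and finally appends the short remainder; the constant-factor win comes from avoiding the intermediate block strings and per-block joins.
import Mathlib
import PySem

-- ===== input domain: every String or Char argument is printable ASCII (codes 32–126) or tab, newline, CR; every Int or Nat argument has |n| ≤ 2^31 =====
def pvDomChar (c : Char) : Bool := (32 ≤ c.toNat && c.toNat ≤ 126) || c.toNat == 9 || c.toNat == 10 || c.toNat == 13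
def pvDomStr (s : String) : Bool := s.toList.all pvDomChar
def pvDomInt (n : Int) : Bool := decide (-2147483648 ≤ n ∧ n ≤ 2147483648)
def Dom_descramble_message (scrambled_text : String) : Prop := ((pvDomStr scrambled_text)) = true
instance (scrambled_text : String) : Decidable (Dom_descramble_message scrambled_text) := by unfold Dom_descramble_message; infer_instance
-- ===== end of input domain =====

-- B replaces A's build-blocks/reorder/join pipeline by one index-walking loop; objective: simpler.

-- ===== PORT A =====
-- blocks = [scrambled_text[i:i+3] for i in range(0, len(scrambled_text), 3)];
-- each block becomes ''.join(block[i] for i in [2,0,1]) when len == 3, is kept as is otherwise;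
-- string slicing/indexing is ported on the code-point list (exact: the PySem.Chars bridge).
def descramble_message (scrambled_text : String) : String :=
  let unscramble_order : List Int := [2, 0, 1]
  let blocks : List (List Char) :=
    (PySem.List.pyRange 0 (PySem.Str.len scrambled_text) 3).map
      (fun i => PySem.List.slice scrambled_text.toList (some i) (some (i + 3)))
  let descrambled : List (List Char) :=
    blocks.foldl
      (fun acc block =>
        acc ++ [if block.length = 3 then
                  unscramble_order.filterMap (fun i => PySem.List.pyGet? block i)
                else block]) []
  String.ofList descrambled.flatten

-- ===== PORT B =====
-- the while loop of Source B; the exit branch performs Source B's final out.append(scrambled_text[i:]);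
-- the loop guard keeps every index in range, so pyGetD's default is never used.
def descrambleLoop (l : List Char) (n : Int) (acc : List Char) (i : Int) : List Char :=
  if i + 3 ≤ n then
    descrambleLoop l n
      (acc ++ [PySem.List.pyGetD l (i + 2) ' ', PySem.List.pyGetD l i ' ',
               PySem.List.pyGetD l (i + 1) ' ']) (i + 3)
  else
    acc ++ PySem.List.slice l (some i) none
termination_by (n - i).toNat
decreasing_by omega

def descramble_message_alt (scrambled_text : String) : String :=
  String.ofList (descrambleLoop scrambled_text.toList (PySem.Str.len scrambled_text) [] 0)

-- ===== PRECONDITION & SPEC =====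
def Spec_descramble_message (scrambled_text : String) (out : String) : Prop := out = descramble_message_alt scrambled_text
instance (scrambled_text : String) (out : String) : Decidable (Spec_descramble_message scrambled_text out) := by unfold Spec_descramble_message; infer_instance

-- ===== CLAIM (what is proved, stated in full; the proofs are below) =====
def Claim_equal_descramble_message : Prop := ∀ (scrambled_text : String), Dom_descramble_message scrambled_text → Spec_descramble_message scrambled_text (descramble_message scrambled_text)

-- ===== LEMMAS AND PROOFS =====

-- proof-side reference recursion: both programs compute this
def gRef : List Char → List Char
  | a :: b :: c :: rest => c :: a :: b :: gRef rest
  | l => l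

theorem gRef_short (l : List Char) (h : l.length < 3) : gRef l = l := by
  match l with
  | [] => rfl
  | [_] => rfl
  | [_, _] => rfl
  | _ :: _ :: _ :: _ => simp at h; omega

-- B's loop from index i contributes gRef of the remaining suffix
theorem descrambleLoop_eq (l : List Char) (acc : List Char) (i : Int) (h0 : 0 ≤ i) :
    descrambleLoop l (l.length : Int) acc i = acc ++ gRef (l.drop i.toNat) := by
  rw [descrambleLoop]
  split
  · rename_i h
    rw [descrambleLoop_eq l _ (i + 3) (by omega)]
    rw [PySem.List.pyGetD_eq_getElem l ' ' (by omega) (by omega),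
        PySem.List.pyGetD_eq_getElem l ' ' h0 (by omega),
        PySem.List.pyGetD_eq_getElem l ' ' (by omega) (by omega)]
    have hi : i.toNat < l.length := by omega
    rw [List.drop_eq_getElem_cons hi,
        List.drop_eq_getElem_cons (by omega : i.toNat + 1 < l.length),
        List.drop_eq_getElem_cons (by omega : i.toNat + 1 + 1 < l.length), gRef]
    have e2 : (i + 2).toNat = i.toNat + 2 := by omega
    have e1 : (i + 1).toNat = i.toNat + 1 := by omega
    have e3 : (i + 3).toNat = i.toNat + 1 + 1 + 1 := by omega
    simp only [e1, e2, e3]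
    simp
  · rename_i h
    rw [PySem.List.slice_from l h0, gRef_short _ (by simp; omega)]
termination_by (l.length - i.toNat)
decreasing_by omega

-- the slice a block comprehension takes, as take/drop on Nat indices
theorem sliceA (l : List Char) (k : Nat) :
    PySem.List.slice l (some (3 * (k : Int))) (some (3 * (k : Int) + 3)) =
      List.take 3 (List.drop (3 * k) l) := by
  have h := PySem.List.slice_natCast_add l (3 * k) 3
  have e1 : (3 * (k : Int)) = ((3 * k : Nat) : Int) := by push_cast; ring
  rw [e1]
  rw [(by norm_num : ((3 * k : Nat) : Int) + 3 = ((3 * k : Nat) : Int) + ((3 : Nat) : Int))]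
  rw [h]

-- A's pipeline, after folding into a map, computes gRef
theorem A_eq_gRef (l : List Char) :
    (((PySem.List.pyRange 0 (l.length : Int) 3).map
        (fun i => PySem.List.slice l (some i) (some (i + 3)))).map
      (fun block => if block.length = 3 then
          ([2, 0, 1] : List Int).filterMap (fun i => PySem.List.pyGet? block i)
        else block)).flatten = gRef l := by
  rw [PySem.List.pyRange_of_pos 0 _ (by norm_num : (0:Int) < 3)]
  simp only [List.map_map, Function.comp_def, zero_add, sliceA]
  match l with
  | [] => norm_num [gRef]
  | [a] =>
    norm_num
    simp [gRef]
  | [a, b] =>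
    norm_num
    simp [gRef]
  | x :: y :: z :: rest =>
    have hrec := A_eq_gRef rest
    rw [PySem.List.pyRange_of_pos 0 _ (by norm_num : (0:Int) < 3)] at hrec
    simp only [List.map_map, Function.comp_def, zero_add, sliceA] at hrec
    have hc : (((((x :: y :: z :: rest).length : Int)) - 0 + 3 - 1) / 3).toNat =
        (if (0 : Int) < ((rest.length : Int)) then ((((rest.length : Int)) - 0 + 3 - 1) / 3).toNat else 0) + 1 := by
      simp only [List.length_cons]
      split <;> push_cast <;> omega
    have hif : (if (0:Int) < (((x :: y :: z :: rest).length : Int)) then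
        (((((x :: y :: z :: rest).length : Int)) - 0 + 3 - 1) / 3).toNat else 0) =
        (if (0 : Int) < ((rest.length : Int)) then ((((rest.length : Int)) - 0 + 3 - 1) / 3).toNat else 0) + 1 := by
      rw [if_pos (by simp; omega)]
      exact hc
    rw [hif, List.range_succ_eq_map]
    simp only [List.map_cons, List.map_map, Function.comp_def, List.flatten_cons]
    have hshift : ∀ k : Nat,
        List.drop (3 * Nat.succ k) (x :: y :: z :: rest) = List.drop (3 * k) rest := by
      intro k
      have : 3 * Nat.succ k = 3 + 3 * k := by omega
      rw [this, ← List.drop_drop]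
      rfl
    simp only [hshift]
    rw [hrec]
    norm_num [gRef, PySem.List.pyGet?, PySem.List.pyIdx?, List.filterMap_cons]
    rfl

-- ===== VERDICT (by name: the statement is the Claim_ definition above) =====
theorem descramble_message_spec : Claim_equal_descramble_message := by
  intro s _
  unfold Spec_descramble_message descramble_message descramble_message_alt
  simp only [PySem.Str.len_eq, PySem.List.foldl_append_singleton_eq_map, List.nil_append]
  rw [descrambleLoop_eq s.toList [] 0 le_rfl]
  rw [A_eq_gRef s.toList]
  simp
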